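-- pv_equiv track=rewrite | github.com/fahd654/smoketests_log_analyser | processor.py | datetimeslist
-- ===== SOURCE A (Python) =====
-- def datetimeslist(tests):
--     datetimeloop = []
--     for block in tests.values():
--         dtholder = ()
--         for line in block:
--             if line.startswith("Date,"):
--                 parts = line.split(",", 1)
--                 if len(parts) > 1:
--                     dtholder = (parts[1].strip(),)
--                     break
--
--         for line in block:
--             if line.startswith("Time,"):
--                 parts = line.split(",", 1)
--                 if len(parts) > 1:
--                     if dtholder:
--                         dtholder = dtholder + (parts[1].strip(),)
--                         datetimeloop.append(dtholder)
--                     break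
--     return datetimeloop
-- ===== SOURCE B (Python) =====
-- def datetimeslist(tests):
--     result = []
--     for block in tests.values():
--         date = None
--         time = None
--         for line in block:
--             if date is None and line.startswith("Date,"):
--                 date = line.split(",", 1)[1].strip()
--             if time is None and line.startswith("Time,"):
--                 time = line.split(",", 1)[1].strip()
--             if date is not None and time is not None:
--                 break
--         if date is not None and time is not None:
--             result.append((date, time))
--     return result
-- ===== Notes on version B (the rewrite author's own statement) =====
-- stated objective: simpler
-- what changed: Replaces A's two sequential scans per block (with a tuple accumulator) by one single pass that records the first Date and first Time line independently and appends the pair only when both are present.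
import Mathlib
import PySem

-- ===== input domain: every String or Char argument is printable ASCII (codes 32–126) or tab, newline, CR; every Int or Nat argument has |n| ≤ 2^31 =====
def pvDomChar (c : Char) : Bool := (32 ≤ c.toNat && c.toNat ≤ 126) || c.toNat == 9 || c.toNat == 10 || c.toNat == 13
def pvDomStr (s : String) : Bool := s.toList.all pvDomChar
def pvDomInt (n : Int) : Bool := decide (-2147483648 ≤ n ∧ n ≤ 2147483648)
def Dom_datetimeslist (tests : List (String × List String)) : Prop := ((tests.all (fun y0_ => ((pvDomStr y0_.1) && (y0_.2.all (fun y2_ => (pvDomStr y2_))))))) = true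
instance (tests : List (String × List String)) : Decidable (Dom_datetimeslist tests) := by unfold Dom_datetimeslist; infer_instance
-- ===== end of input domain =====

-- B changes: one single pass per block recording the first Date and first Time line,
-- instead of A's two sequential scans with a growing-tuple holder (objective: simpler).
-- The Lean parameter is the association list behind the Python dict `tests`; both ports
-- read its values through PySem.Dict.ofList (Python dict construction semantics).

-- ===== PORT A =====
-- first loop of A: first line starting with "Date," whose split(",",1) has > 1 parts (break there)
def pvFindDate : List String → Option String
  | [] => none
  | line :: rest =>
    if PySem.Str.startswith line "Date," then
      match PySem.Str.splitMax? line "," 1 with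
      | some parts =>
        -- `parts.getD 1 ""` is Python's parts[1]; guarded by len(parts) > 1
        if 1 < parts.length then some (PySem.Str.strip (parts.getD 1 "")) else pvFindDate rest
      | none => pvFindDate rest
    else pvFindDate rest

-- second loop of A: first line starting with "Time," whose split(",",1) has > 1 parts (break there)
def pvFindTime : List String → Option String
  | [] => none
  | line :: rest =>
    if PySem.Str.startswith line "Time," then
      match PySem.Str.splitMax? line "," 1 with
      | some parts =>
        if 1 < parts.length then some (PySem.Str.strip (parts.getD 1 "")) else pvFindTime rest
      | none => pvFindTime rest
    else pvFindTime rest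

def datetimeslist (tests : List (String × List String)) : List (String × String) :=
  (PySem.Dict.ofList tests).values.foldl (fun datetimeloop block =>
    let dtholder := pvFindDate block
    match pvFindTime block with
    | some t =>
      match dtholder with
      | some d => datetimeloop ++ [(d, t)]
      | none => datetimeloop
    | none => datetimeloop) []

-- ===== PORT B =====
-- line.split(",", 1)[1]: index 1 always exists for a line starting with "Date,"/"Time,"
-- (the separator occurs), so the Lean defaults below are never the result.
def pvTail1 (line : String) : String :=
  PySem.Str.strip (((PySem.Str.splitMax? line "," 1).getD []).getD 1 "")

-- the inner for-loop of B: one pass, first Date / first Time, early break once both are set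
def pvScan : List String → Option String → Option String → Option String × Option String
  | [], date, time => (date, time)
  | line :: rest, date, time =>
    let date' := if date.isNone && PySem.Str.startswith line "Date," then some (pvTail1 line) else date
    let time' := if time.isNone && PySem.Str.startswith line "Time," then some (pvTail1 line) else time
    if date'.isSome && time'.isSome then (date', time') else pvScan rest date' time'

def datetimeslist_alt (tests : List (String × List String)) : List (String × String) :=
  (PySem.Dict.ofList tests).values.foldl (fun result block =>
    match pvScan block none none with
    | (some d, some t) => result ++ [(d, t)]
    | _ => result) []

-- ===== PRECONDITION & SPEC =====
def Spec_datetimeslist (tests : List (String × List String)) (out : List (String × String)) : Prop := out = datetimeslist_alt tests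
instance (tests : List (String × List String)) (out : List (String × String)) : Decidable (Spec_datetimeslist tests out) := by unfold Spec_datetimeslist; infer_instance

-- ===== CLAIM (what is proved, stated in full; the proofs are below) =====
def Claim_equal_datetimeslist : Prop := ∀ (tests : List (String × List String)), Dom_datetimeslist tests → Spec_datetimeslist tests (datetimeslist tests)

-- ===== LEMMAS AND PROOFS =====

theorem splitOnMax_go_zero (sep : List Char) (fuel : Nat) (l cur : List Char)
    (acc : List (List Char)) :
    PySem.Chars.splitOnMax.go sep fuel 0 l cur acc = ((cur.reverse ++ l) :: acc).reverse := by
  cases fuel with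
  | zero => simp [PySem.Chars.splitOnMax.go]
  | succ n => cases l <;> simp [PySem.Chars.splitOnMax.go]

theorem split_prefix (c0 c1 c2 c3 : Char) (h0 : c0 ≠ ',') (h1 : c1 ≠ ',') (h2 : c2 ≠ ',')
    (h3 : c3 ≠ ',') (r : List Char) :
    PySem.Chars.splitOnMax (c0 :: c1 :: c2 :: c3 :: ',' :: r) [','] 1 = [[c0, c1, c2, c3], r] := by
  simp [PySem.Chars.splitOnMax, PySem.Chars.splitOnMax.go, List.isPrefixOf,
    Ne.symm h0, Ne.symm h1, Ne.symm h2, Ne.symm h3, splitOnMax_go_zero]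

theorem startswith_split (line : String) (c0 c1 c2 c3 : Char) (h0 : c0 ≠ ',') (h1 : c1 ≠ ',')
    (h2 : c2 ≠ ',') (h3 : c3 ≠ ',')
    (h : PySem.Chars.startswith line.toList [c0, c1, c2, c3, ','] = true) :
    ∃ r : List Char, line.toList = c0 :: c1 :: c2 :: c3 :: ',' :: r ∧
      PySem.Str.splitMax? line "," 1 =
        some [String.ofList [c0, c1, c2, c3], String.ofList r] := by
  have hp : [c0, c1, c2, c3, ','] <+: line.toList := by
    simpa [PySem.Chars.startswith, List.isPrefixOf_iff_prefix] using h
  obtain ⟨r, hr⟩ := hp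
  have hl : line.toList = c0 :: c1 :: c2 :: c3 :: ',' :: r := hr.symm
  refine ⟨r, hl, ?_⟩
  simp [PySem.Str.splitMax?, PySem.Chars.splitMax?, hl, split_prefix c0 c1 c2 c3 h0 h1 h2 h3 r]

theorem scan_eq (block : List String) : ∀ (d t : Option String),
    pvScan block d t =
      ((match d with | some x => some x | none => pvFindDate block),
       (match t with | some x => some x | none => pvFindTime block)) := by
  induction block with
  | nil => intro d t; cases d <;> cases t <;> simp [pvScan, pvFindDate, pvFindTime]
  | cons line rest ih =>
    intro d t
    have hdate : pvFindDate (line :: rest) =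
        (if PySem.Chars.startswith line.toList ['D', 'a', 't', 'e', ','] = true
          then some (pvTail1 line) else pvFindDate rest) := by
      by_cases h : PySem.Chars.startswith line.toList ['D', 'a', 't', 'e', ','] = true
      · obtain ⟨r, _, hs⟩ := startswith_split line 'D' 'a' 't' 'e'
          (by decide) (by decide) (by decide) (by decide) h
        simp [pvFindDate, PySem.Str.startswith, h, hs, pvTail1]
      · simp [pvFindDate, PySem.Str.startswith, h]
    have htime : pvFindTime (line :: rest) =
        (if PySem.Chars.startswith line.toList ['T', 'i', 'm', 'e', ','] = true
          then some (pvTail1 line) else pvFindTime rest) := by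
      by_cases h : PySem.Chars.startswith line.toList ['T', 'i', 'm', 'e', ','] = true
      · obtain ⟨r, _, hs⟩ := startswith_split line 'T' 'i' 'm' 'e'
          (by decide) (by decide) (by decide) (by decide) h
        simp [pvFindTime, PySem.Str.startswith, h, hs, pvTail1]
      · simp [pvFindTime, PySem.Str.startswith, h]
    by_cases hD : PySem.Chars.startswith line.toList ['D', 'a', 't', 'e', ','] = true <;>
      by_cases hT : PySem.Chars.startswith line.toList ['T', 'i', 'm', 'e', ','] = true <;>
      cases d <;> cases t <;>
      simp [pvScan, PySem.Str.startswith, hD, hT, ih, hdate, htime]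

theorem block_eq (acc : List (String × String)) (block : List String) :
    (match pvScan block none none with
     | (some d, some t) => acc ++ [(d, t)]
     | _ => acc) =
    (let dtholder := pvFindDate block
     match pvFindTime block with
     | some t =>
       match dtholder with
       | some d => acc ++ [(d, t)]
       | none => acc
     | none => acc) := by
  rw [scan_eq]
  cases pvFindDate block <;> cases pvFindTime block <;> simp

-- ===== VERDICT (by name: the statement is the Claim_ definition above) =====
theorem datetimeslist_spec : Claim_equal_datetimeslist := by
  intro tests _
  unfold Spec_datetimeslist datetimeslist datetimeslist_alt
  refine congrFun (congrFun (congrArg _ (funext fun acc => funext fun block => ?_)) _) _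
  exact (block_eq acc block).symm
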